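-- pv_equiv track=rewrite | github.com/myxmhy/ConvMamba | models/easymamba_model.py | factorize_into_powers_of_two
-- ===== SOURCE A (Python) =====
-- def factorize_into_powers_of_two(n, parts):
--     def helper(n, parts):
--         if parts == 1:
--             return [n]
--         part_value = 2 ** (n.bit_length() // parts)
--         remaining = n // part_value
--         return [part_value] + helper(remaining, parts - 1)
--
--     factors = helper(n, parts)
--     # Adjust to make sure all factors are powers of 2
--     for i in range(len(factors)):
--         factors[i] = 2 ** (factors[i].bit_length() - 1)
--     factors.sort(reverse=True)
--     return factors
-- ===== SOURCE B (Python) =====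
-- def factorize_into_powers_of_two(n, parts):
--     factors = []
--     for p in range(parts, 1, -1):
--         pv = 2 ** (n.bit_length() // p)
--         factors.append(pv)
--         n //= pv
--     factors.append(n)
--     factors = [2 ** (f.bit_length() - 1) for f in factors]
--     factors.sort(reverse=True)
--     return factors
-- ===== Notes on version B (the rewrite author's own statement) =====
-- stated objective: simpler
-- what changed: Replaces A's linear recursion (which rebuilds the result with repeated [pv] + rest list concatenation) plus a second in-place index loop with one explicit countdown loop over range(parts, 1, -1) using append and a list comprehension for the power-of-two adjustment.
-- outside the precondition, e.g. on factorize_into_powers_of_two(0, 1): A returns [0.5], B returns [0.5]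
import Mathlib
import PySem

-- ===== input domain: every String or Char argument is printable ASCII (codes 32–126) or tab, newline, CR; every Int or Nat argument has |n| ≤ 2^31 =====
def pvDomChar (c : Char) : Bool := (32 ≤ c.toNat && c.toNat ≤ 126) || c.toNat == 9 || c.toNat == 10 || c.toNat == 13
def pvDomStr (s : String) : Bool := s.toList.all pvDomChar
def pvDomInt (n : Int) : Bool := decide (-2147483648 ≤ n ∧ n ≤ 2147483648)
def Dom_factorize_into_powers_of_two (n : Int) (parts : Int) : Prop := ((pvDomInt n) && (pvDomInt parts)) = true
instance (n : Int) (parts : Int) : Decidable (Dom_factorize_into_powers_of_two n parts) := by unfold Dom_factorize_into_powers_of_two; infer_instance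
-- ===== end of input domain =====

-- B replaces A's linear recursion (which rebuilds the result with repeated list concatenation)
-- and its second in-place adjustment loop by one countdown loop over range(parts, 1, -1) with
-- append and a list comprehension: same values, simpler shape.

-- ===== PORT A =====
-- helper(n, parts): fuel = (parts-1).toNat; at fuel k+1 the Python 'parts' is k+2.
-- Exponents: in Python '2 ** e' with e = bit_length // parts; under Pre_ (parts ≥ 1) every
-- exponent that is reached is ≥ 0, so '.toNat' on it is exact there; likewise
-- 'bit_length - 1' is Nat subtraction, exact under Pre_ (n ≠ 0 keeps every factor nonzero).
def pvHelperA (n : Int) : Nat → List Int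
  | 0 => [n]
  | k + 1 =>
    let part_value : Int := 2 ^ ((PySem.Int.floordiv (PySem.Int.bitLength n : Int) ((k : Int) + 2)).toNat)
    let remaining : Int := PySem.Int.floordiv n part_value
    part_value :: pvHelperA remaining k

-- 'for i in range(len(factors)): factors[i] = 2 ** (factors[i].bit_length() - 1)'
def pvAdjustA : List Int → List Int
  | [] => []
  | f :: t => ((2 : Int) ^ (PySem.Int.bitLength f - 1)) :: pvAdjustA t

def factorize_into_powers_of_two (n : Int) (parts : Int) : List Int :=
  let factors := pvHelperA n (parts - 1).toNat
  let factors := pvAdjustA factors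
  PySem.List.sorted factors (fun x => x) true

-- ===== PORT B =====
def factorize_into_powers_of_two_alt (n : Int) (parts : Int) : List Int :=
  let st := (PySem.List.pyRange parts 1 (-1)).foldl
    (fun (st : List Int × Int) (p : Int) =>
      let pv : Int := 2 ^ ((PySem.Int.floordiv (PySem.Int.bitLength st.2 : Int) p).toNat)
      (st.1 ++ [pv], PySem.Int.floordiv st.2 pv)) ([], n)
  let factors := st.1 ++ [st.2]
  let factors := factors.map (fun f => ((2 : Int) ^ (PySem.Int.bitLength f - 1)))
  PySem.List.sorted factors (fun x => x) true

-- ===== PRECONDITION & SPEC =====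
-- Pre_ excludes parts ≤ 0, where A raises (ZeroDivisionError for parts = 0, RecursionError
-- below), and n = 0, where A returns floats (2**-1 = 0.5), not values of the declared int type.
def Pre_factorize_into_powers_of_two (n : Int) (parts : Int) : Prop := 1 ≤ parts ∧ n ≠ 0
instance (n : Int) (parts : Int) : Decidable (Pre_factorize_into_powers_of_two n parts) := by unfold Pre_factorize_into_powers_of_two; infer_instance
def pvWitness_factorize_into_powers_of_two : Int × Int := (12, 3)
def Spec_factorize_into_powers_of_two (n : Int) (parts : Int) (out : List Int) : Prop := out = factorize_into_powers_of_two_alt n parts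
instance (n : Int) (parts : Int) (out : List Int) : Decidable (Spec_factorize_into_powers_of_two n parts out) := by unfold Spec_factorize_into_powers_of_two; infer_instance

-- ===== CLAIM (what is proved, stated in full; the proofs are below) =====
def Claim_equal_factorize_into_powers_of_two : Prop := ∀ (n : Int) (parts : Int), Dom_factorize_into_powers_of_two n parts → Pre_factorize_into_powers_of_two n parts → Spec_factorize_into_powers_of_two n parts (factorize_into_powers_of_two n parts)

-- ===== LEMMAS AND PROOFS =====

-- B's loop over range(k+1, 1, -1), started at (acc, n), produces acc ++ pvHelperA n k
-- (factor list with the trailing leftover appended).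
theorem pvLoopEqHelper (k : Nat) : ∀ (n : Int) (acc : List Int),
    ((PySem.List.pyRange ((k : Int) + 1) 1 (-1)).foldl
      (fun (st : List Int × Int) (p : Int) =>
        let pv : Int := 2 ^ ((PySem.Int.floordiv (PySem.Int.bitLength st.2 : Int) p).toNat)
        (st.1 ++ [pv], PySem.Int.floordiv st.2 pv)) (acc, n)).1 ++
    [((PySem.List.pyRange ((k : Int) + 1) 1 (-1)).foldl
      (fun (st : List Int × Int) (p : Int) =>
        let pv : Int := 2 ^ ((PySem.Int.floordiv (PySem.Int.bitLength st.2 : Int) p).toNat)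
        (st.1 ++ [pv], PySem.Int.floordiv st.2 pv)) (acc, n)).2] = acc ++ pvHelperA n k := by
  induction k with
  | zero =>
    intro n acc
    rw [PySem.List.pyRange_neg_one_eq_nil (by norm_num)]
    simp [pvHelperA]
  | succ k ih =>
    intro n acc
    rw [show ((((k + 1 : Nat)) : Int) + 1) = ((k : Int) + 2) by push_cast; ring,
        PySem.List.pyRange_neg_one_cons (by omega)]
    simp only [List.foldl_cons]
    rw [show ((k : Int) + 2 - 1) = ((k : Int) + 1) by ring]
    rw [ih]
    simp [pvHelperA]

theorem pvAdjustA_eq_map (xs : List Int) :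
    pvAdjustA xs = xs.map (fun f => ((2 : Int) ^ (PySem.Int.bitLength f - 1))) := by
  induction xs with
  | nil => rfl
  | cons f t ih => simp [pvAdjustA, ih]

-- ===== VERDICT (by name: the statement is the Claim_ definition above) =====
theorem factorize_into_powers_of_two_spec : Claim_equal_factorize_into_powers_of_two := by
  intro n parts _ hpre
  obtain ⟨hp, _⟩ := hpre
  unfold Spec_factorize_into_powers_of_two
  unfold factorize_into_powers_of_two factorize_into_powers_of_two_alt
  have hk : parts = ((parts - 1).toNat : Int) + 1 := by omega
  rw [hk]
  have h := pvLoopEqHelper (parts - 1).toNat n []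
  simp only [List.nil_append] at h
  simp only [pvAdjustA_eq_map, h]
  norm_num
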